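-- pv_equiv track=rewrite | github.com/ganguloo/IPre20232Calendario | Interrogaciones/src/filtracion_archivos/modulos.py | ramos_mismo_modulo
-- ===== SOURCE A (Python) =====
-- def ramos_mismo_modulo(set_horarios: set, lista_horarios: list) -> dict:
--     """Recibe el set de horarios y la lista de horarios entregados por la función limpieza_cursos.
--      Entrega un diccionario de los módulos y cursos asociados.
--
--      Args:
--         set_horarios (set): Contiene los módulos.
--         lista_horarios (list): Es una lista de listas de la forma [nombre_curso, modulos]
--
--      Returns:
--         dict[str, list]: Retorna un diccionario donde cada key es un módulo y el value asociado es
--           una lista con todos los cursos que usan ese módulo.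
--     """
--
--     ramos_mismo_modulo = dict()
--
--     for modulo in set_horarios:
--         cursos_mismo_horario = list()
--
--         for curso, modulo_curso in lista_horarios:
--             if modulo in modulo_curso:
--                 cursos_mismo_horario.append(curso)
--
--         if modulo not in ramos_mismo_modulo.keys():
--             ramos_mismo_modulo[modulo] = cursos_mismo_horario
--         else:
--             ramos_mismo_modulo[modulo] = ramos_mismo_modulo[modulo] + \
--                 cursos_mismo_horario
--     return ramos_mismo_modulo
-- ===== SOURCE B (Python) =====
-- def ramos_mismo_modulo(set_horarios: set, lista_horarios: list) -> dict:
--     """One pass over the courses instead of rescanning them per module."""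
--     resultado = {modulo: [] for modulo in set_horarios}
--     for curso, modulo_curso in lista_horarios:
--         for modulo in set(modulo_curso):
--             if modulo in resultado:
--                 resultado[modulo].append(curso)
--     return resultado
-- ===== Notes on version B (the rewrite author's own statement) =====
-- stated objective: faster
-- what changed: Instead of rescanning the whole course list once per module (membership test inside a nested loop), B initialises one empty list per module and makes a single pass over the courses, appending each course to the buckets of the distinct modules it uses.
import Mathlib
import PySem

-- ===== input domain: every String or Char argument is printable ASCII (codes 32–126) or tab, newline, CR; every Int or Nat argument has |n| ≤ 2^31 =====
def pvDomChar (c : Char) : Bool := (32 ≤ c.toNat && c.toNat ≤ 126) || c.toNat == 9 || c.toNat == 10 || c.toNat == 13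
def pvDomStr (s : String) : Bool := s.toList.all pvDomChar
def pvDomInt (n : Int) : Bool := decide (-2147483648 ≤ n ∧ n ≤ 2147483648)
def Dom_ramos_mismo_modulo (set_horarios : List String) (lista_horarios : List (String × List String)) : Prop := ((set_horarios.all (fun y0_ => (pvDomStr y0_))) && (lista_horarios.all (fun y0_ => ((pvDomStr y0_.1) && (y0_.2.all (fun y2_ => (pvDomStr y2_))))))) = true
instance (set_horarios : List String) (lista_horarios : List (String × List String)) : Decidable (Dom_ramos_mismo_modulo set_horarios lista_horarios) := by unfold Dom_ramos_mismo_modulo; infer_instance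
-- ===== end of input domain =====

-- B replaces A's per-module rescan of the course list by a single pass over the
-- courses that appends each course to the buckets of the distinct modules it uses (faster in a timing run).


-- ===== PORT A =====
def ramos_mismo_modulo (set_horarios : List String) (lista_horarios : List (String × List String)) : List (String × List String) :=
  (set_horarios.foldl
    (fun (d : PySem.Dict String (List String)) modulo =>
      let cursos_mismo_horario : List String :=
        lista_horarios.foldl
          (fun acc p => if modulo ∈ p.2 then acc ++ [p.1] else acc) []
      if d.contains modulo = false then
        d.insert modulo cursos_mismo_horario
      else
        d.insert modulo (d.getD modulo [] ++ cursos_mismo_horario))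
    PySem.Dict.empty).items

-- ===== PORT B =====
def ramos_mismo_modulo_alt (set_horarios : List String) (lista_horarios : List (String × List String)) : List (String × List String) :=
  let resultado : PySem.Dict String (List String) :=
    set_horarios.foldl (fun d modulo => d.insert modulo []) PySem.Dict.empty
  (lista_horarios.foldl
    (fun d p =>
      (PySem.Set.ofList p.2).foldl
        (fun d modulo =>
          if d.contains modulo then d.modify modulo [] (fun l => l ++ [p.1]) else d)
        d)
    resultado).items

-- ===== PRECONDITION & SPEC =====
-- Pre_: set_horarios models a Python 'set', whose elements are necessarily distinct;
-- the claim is stated for exactly those lists (no input a Python caller can build is excluded).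
def Pre_ramos_mismo_modulo (set_horarios : List String) (lista_horarios : List (String × List String)) : Prop :=
  set_horarios.Nodup
instance (set_horarios : List String) (lista_horarios : List (String × List String)) : Decidable (Pre_ramos_mismo_modulo set_horarios lista_horarios) := by unfold Pre_ramos_mismo_modulo; infer_instance
def pvWitness_ramos_mismo_modulo : List String × (List (String × List String)) :=
  (["m1", "m2"], [("curso a", ["m1"]), ("curso b", ["m1", "m2"])])
def Spec_ramos_mismo_modulo (set_horarios : List String) (lista_horarios : List (String × List String)) (out : List (String × List String)) : Prop := out = ramos_mismo_modulo_alt set_horarios lista_horarios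
instance (set_horarios : List String) (lista_horarios : List (String × List String)) (out : List (String × List String)) : Decidable (Spec_ramos_mismo_modulo set_horarios lista_horarios out) := by unfold Spec_ramos_mismo_modulo; infer_instance

-- ===== CLAIM (what is proved, stated in full; the proofs are below) =====
def Claim_equal_ramos_mismo_modulo : Prop := ∀ (set_horarios : List String) (lista_horarios : List (String × List String)), Dom_ramos_mismo_modulo set_horarios lista_horarios → Pre_ramos_mismo_modulo set_horarios lista_horarios → Spec_ramos_mismo_modulo set_horarios lista_horarios (ramos_mismo_modulo set_horarios lista_horarios)

-- ===== LEMMAS AND PROOFS =====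

-- the per-module bucket both programs compute: courses (in list order) whose module list contains m
def pvCol (m : String) (l : List (String × List String)) : List String :=
  (l.filter (fun p => m ∈ p.2)).map (fun p => p.1)

lemma pvCol_cons (m : String) (p : String × List String) (l : List (String × List String)) :
    pvCol m (p :: l) = (if m ∈ p.2 then [p.1] else []) ++ pvCol m l := by
  simp only [pvCol, List.filter_cons]
  split_ifs with h <;> simp_all

-- A's fold over fresh modules appends one bucket per module
lemma pvA_items (lista : List (String × List String)) :
    ∀ (s : List String) (d : PySem.Dict String (List String)), s.Nodup →
      (∀ m ∈ s, d.contains m = false) →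
      (s.foldl
        (fun d modulo =>
          let cursos : List String :=
            lista.foldl (fun acc p => if modulo ∈ p.2 then acc ++ [p.1] else acc) []
          if d.contains modulo = false then d.insert modulo cursos
          else d.insert modulo (d.getD modulo [] ++ cursos)) d).items
      = d.items ++ s.map (fun m => (m, pvCol m lista)) := by
  intro s
  induction s with
  | nil => intro d _ _; simp
  | cons m s ih =>
    intro d hnd hfresh
    have hm : d.contains m = false := hfresh m (by simp)
    have hcol : lista.foldl (fun acc p => if m ∈ p.2 then acc ++ [p.1] else acc) []
        = pvCol m lista := by
      simpa [pvCol] using PySem.List.foldl_append_if (fun p => decide (m ∈ p.2)) (fun p => p.1) lista []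
    simp only [List.foldl_cons]
    rw [if_pos hm, hcol]
    rw [ih (d.insert m (pvCol m lista)) hnd.of_cons ?_]
    · rw [PySem.Dict.items_insert_of_not_contains d _ hm]
      simp
    · intro m' hm'
      rw [PySem.Dict.contains_insert]
      have : m' ≠ m := by
        rintro rfl; exact (List.nodup_cons.mp hnd).1 hm'
      simp [this, hfresh m' (List.mem_cons_of_mem _ hm')]

-- building the initial dict of B: one empty bucket per module
lemma pvB_init :
    ∀ (s : List String) (d : PySem.Dict String (List String)), s.Nodup →
      (∀ m ∈ s, d.contains m = false) →
      s.foldl (fun d modulo => d.insert modulo []) d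
      = PySem.Dict.mk (d.items ++ s.map (fun m => (m, ([] : List String)))) := by
  intro s
  induction s with
  | nil => intro d _ _; apply PySem.Dict.ext; simp
  | cons m s ih =>
    intro d hnd hfresh
    have hm : d.contains m = false := hfresh m (by simp)
    simp only [List.foldl_cons]
    rw [ih (d.insert m []) hnd.of_cons ?_]
    · apply PySem.Dict.ext
      rw [PySem.Dict.items_insert_of_not_contains d _ hm]
      simp
    · intro m' hm'
      rw [PySem.Dict.contains_insert]
      have hne : m' ≠ m := by
        rintro rfl; exact (List.nodup_cons.mp hnd).1 hm'
      simp [hne, hfresh m' (List.mem_cons_of_mem _ hm')]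

-- one course: appends its name to the bucket of every distinct module it uses that is a key
lemma pvB_one (x : String) :
    ∀ (ms : List String) (s : List String) (g : String → List String), ms.Nodup → s.Nodup →
      (ms.foldl
        (fun d modulo =>
          if d.contains modulo then d.modify modulo [] (fun l => l ++ [x]) else d)
        (PySem.Dict.mk (s.map (fun m => (m, g m)))))
      = PySem.Dict.mk (s.map (fun m => (m, g m ++ if m ∈ ms then [x] else []))) := by
  intro ms
  induction ms with
  | nil =>
    intro s g _ _
    simp
  | cons m' ms ih =>
    intro s g hms hs
    have hkeys : (PySem.Dict.mk (s.map (fun m => (m, g m)))).keys = s := by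
      simp [PySem.Dict.keys, Function.comp_def]
    simp only [List.foldl_cons]
    by_cases hm' : m' ∈ s
    · have hcont : (PySem.Dict.mk (s.map (fun m => (m, g m)))).contains m' = true := by
        rw [PySem.Dict.contains_iff_mem_keys, hkeys]; exact hm'
      rw [if_pos hcont]
      have hget : (PySem.Dict.mk (s.map (fun m => (m, g m)))).getD m' [] = g m' := by
        apply PySem.Dict.getD_of_mem_items
        · exact List.mem_map_of_mem hm'
        · rw [hkeys]; exact hs
      have hstep : (PySem.Dict.mk (s.map (fun m => (m, g m)))).modify m' [] (fun l => l ++ [x])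
          = PySem.Dict.mk (s.map (fun m => (m, if m = m' then g m ++ [x] else g m))) := by
        apply PySem.Dict.ext
        rw [PySem.Dict.modify, hget]
        rw [PySem.Dict.items_insert_of_contains _ _ hcont]
        rw [List.map_map]
        apply List.map_congr_left
        intro a _
        by_cases h : a = m' <;> simp [h]
      rw [hstep, ih s (fun m => if m = m' then g m ++ [x] else g m) hms.of_cons hs]
      congr 1
      apply List.map_congr_left
      intro a _
      by_cases h : a = m'
      · subst h
        have : a ∉ ms := (List.nodup_cons.mp hms).1
        simp [this]
      · simp [h]
    · have hcont : (PySem.Dict.mk (s.map (fun m => (m, g m)))).contains m' = false := by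
        rw [← Bool.not_eq_true, PySem.Dict.contains_iff_mem_keys, hkeys]; exact hm'
      rw [if_neg (by simp [hcont])]
      rw [ih s g hms.of_cons hs]
      congr 1
      apply List.map_congr_left
      intro a ha
      have h : a ≠ m' := by rintro rfl; exact hm' ha
      simp [h]

-- B's course fold keeps the dict in bucket shape
lemma pvB_fold (s : List String) (hs : s.Nodup) :
    ∀ (l : List (String × List String)) (g : String → List String),
      (l.foldl
        (fun d p =>
          (PySem.Set.ofList p.2).foldl
            (fun d modulo =>
              if d.contains modulo then d.modify modulo [] (fun l => l ++ [p.1]) else d)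
            d)
        (PySem.Dict.mk (s.map (fun m => (m, g m)))))
      = PySem.Dict.mk (s.map (fun m => (m, g m ++ pvCol m l))) := by
  intro l
  induction l with
  | nil => intro g; simp [pvCol]
  | cons p l ih =>
    intro g
    simp only [List.foldl_cons]
    rw [pvB_one p.1 (PySem.Set.ofList p.2) s g (PySem.Set.nodup_ofList p.2) hs]
    have hset : ∀ m, (if m ∈ PySem.Set.ofList p.2 then [p.1] else []) = (if m ∈ p.2 then [p.1] else []) := by
      intro m; simp [PySem.Set.mem_ofList]
    simp only [hset]
    rw [ih (fun m => g m ++ if m ∈ p.2 then [p.1] else [])]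
    congr 1
    apply List.map_congr_left
    intro m _
    rw [pvCol_cons]
    simp [List.append_assoc]

-- ===== VERDICT (by name: the statement is the Claim_ definition above) =====
theorem ramos_mismo_modulo_spec : Claim_equal_ramos_mismo_modulo := by
  intro s l _ hpre
  unfold Spec_ramos_mismo_modulo
  simp only [ramos_mismo_modulo, ramos_mismo_modulo_alt]
  rw [pvA_items l s PySem.Dict.empty hpre (fun m _ => rfl)]
  rw [pvB_init s PySem.Dict.empty hpre (fun m _ => rfl)]
  have hB := pvB_fold s hpre l (fun _ => [])
  have hmk : PySem.Dict.mk ((PySem.Dict.empty : PySem.Dict String (List String)).items ++ s.map (fun m => (m, ([] : List String)))) = PySem.Dict.mk (s.map (fun m => (m, (fun _ : String => ([] : List String)) m))) := rfl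
  rw [hmk, hB]
  simp [show (PySem.Dict.empty : PySem.Dict String (List String)).items = [] from rfl]
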